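-- pv_equiv track=rewrite | github.com/edwardchang7/engg4000 | src/backend/Collections/Tonal_Patterns.py | _get_beats_length
-- ===== SOURCE A (Python) =====
-- def _get_beats_length(pattern):
--     length = 0
--     to_count = True
--
--     # counts t he length of each bar within the combined pattern
--     for char in pattern:
--         if char == '(':
--             to_count = False
--
--         # if its a digit, then check if to_count is true (to_count will be false if its a rest's beat)
--         if char.isdigit() and to_count:
--             length += 1
--
--         elif char.isdigit() and not to_count:
--             to_count = True
--
--
--     return length
-- ===== SOURCE B (Python) =====
-- def _get_beats_length(pattern):
--     # Split on '(' : each later segment starts right after a '(' , where exactly one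
--     # digit (the rest's beat) is skipped if the segment run contains any digit.
--     segments = pattern.split('(')
--     total = sum(1 for c in segments[0] if c.isdigit())
--     for seg in segments[1:]:
--         d = sum(1 for c in seg if c.isdigit())
--         if d != 0:
--             total = total + (d - 1)
--     return total
-- ===== Notes on version B (the rewrite author's own statement) =====
-- stated objective: simpler
-- what changed: Replaced the armed-flag per-character scan with a two-phase computation that splits the pattern at each open parenthesis: count all digits of the first segment, and for each later segment add its digit count minus the one skipped rest-beat digit when the segment contains a digit.
import Mathlib
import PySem

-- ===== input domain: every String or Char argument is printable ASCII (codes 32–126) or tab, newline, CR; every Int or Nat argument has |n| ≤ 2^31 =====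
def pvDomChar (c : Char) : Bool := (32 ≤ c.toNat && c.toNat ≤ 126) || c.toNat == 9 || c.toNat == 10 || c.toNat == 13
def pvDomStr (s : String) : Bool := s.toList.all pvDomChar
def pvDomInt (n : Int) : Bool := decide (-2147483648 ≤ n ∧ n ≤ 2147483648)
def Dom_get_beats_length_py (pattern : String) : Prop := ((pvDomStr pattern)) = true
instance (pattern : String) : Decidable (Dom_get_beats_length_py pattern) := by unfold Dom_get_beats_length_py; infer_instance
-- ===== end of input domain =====

-- B replaces A's armed-flag character scan by a split-at-open-parenthesis two-phase count (simpler decomposition, same cost).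

-- ===== PORT A =====
-- literal port of A's scan: state = (length, to_count)
def get_beats_length_py (pattern : String) : Int :=
  (pattern.toList.foldl (fun (st : Int × Bool) char =>
      let st1 := if char == '(' then (st.1, false) else st
      if PySem.Chars.isdigit char && st1.2 then (st1.1 + 1, st1.2)
      else if PySem.Chars.isdigit char && !st1.2 then (st1.1, true)
      else st1)
    ((0 : Int), true)).1

-- ===== PORT B =====
-- sum(1 for c in s if c.isdigit())
def pvDigits (s : String) : Int :=
  s.toList.foldl (fun a c => if PySem.Chars.isdigit c then a + 1 else a) 0

def get_beats_length_py_alt (pattern : String) : Int :=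
  match PySem.Str.split? pattern "(" with
  | none => 0            -- unreachable: separator "(" is nonempty
  | some segments =>
    match segments with
    | [] => 0            -- unreachable: split always yields at least one segment
    | first :: rest =>
        rest.foldl (fun total seg =>
          let d := pvDigits seg
          if d ≠ 0 then total + (d - 1) else total) (pvDigits first)

-- ===== PRECONDITION & SPEC =====
def Spec_get_beats_length_py (pattern : String) (out : Int) : Prop := out = get_beats_length_py_alt pattern
instance (pattern : String) (out : Int) : Decidable (Spec_get_beats_length_py pattern out) := by unfold Spec_get_beats_length_py; infer_instance

-- ===== CLAIM (what is proved, stated in full; the proofs are below) =====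
def Claim_equal_get_beats_length_py : Prop := ∀ (pattern : String), Dom_get_beats_length_py pattern → Spec_get_beats_length_py pattern (get_beats_length_py pattern)

-- ===== LEMMAS AND PROOFS =====

-- split of a list on the single character '(', as a structural recursion: (first segment, later segments)
def pvSegs : List Char → List Char × List (List Char)
  | [] => ([], [])
  | c :: t =>
      let p := pvSegs t
      if c = '(' then ([], p.1 :: p.2) else (c :: p.1, p.2)

-- digit count of a List Char (pvDigits on the underlying list)
def pvDcl (l : List Char) : Int :=
  l.foldl (fun a c => if PySem.Chars.isdigit c then a + 1 else a) 0

lemma pvDcl_shift (l : List Char) : ∀ a : Int,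
    l.foldl (fun a c => if PySem.Chars.isdigit c then a + 1 else a) a = a + pvDcl l := by
  induction l with
  | nil => intro a; simp [pvDcl]
  | cons c t ih =>
      intro a
      simp only [pvDcl, List.foldl_cons]
      rw [ih, ih]
      split <;> ring

lemma pvDcl_cons (c : Char) (l : List Char) :
    pvDcl (c :: l) = (if PySem.Chars.isdigit c then 1 else 0) + pvDcl l := by
  simp only [pvDcl, List.foldl_cons]
  rw [pvDcl_shift]
  split <;> simp [pvDcl]

lemma pvDcl_nonneg (l : List Char) : 0 ≤ pvDcl l := by
  induction l with
  | nil => simp [pvDcl]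
  | cons c t ih =>
      rw [pvDcl_cons]
      split <;> omega

-- the per-rest-segment contribution of B
def pvSkip (f : List Char) : Int := if pvDcl f ≠ 0 then pvDcl f - 1 else 0

-- B's fold over the later segments
def pvSumRest (init : Int) (r : List (List Char)) : Int :=
  r.foldl (fun total seg =>
    let d := pvDcl seg
    if d ≠ 0 then total + (d - 1) else total) init

lemma pvSumRest_cons (init : Int) (f : List Char) (r : List (List Char)) :
    pvSumRest init (f :: r) = pvSumRest (init + pvSkip f) r := by
  simp only [pvSumRest, List.foldl_cons, pvSkip]
  split <;> simp

lemma pvSumRest_shift (r : List (List Char)) : ∀ a b : Int,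
    pvSumRest (a + b) r = a + pvSumRest b r := by
  induction r with
  | nil => intro a b; simp [pvSumRest]
  | cons f t ih =>
      intro a b
      rw [pvSumRest_cons, pvSumRest_cons, add_assoc, ih]

-- the key invariant: A's scan from either flag state computes B's split-based sums
-- pvStep is definitionally A's loop body (proof helper)
def pvStep : Int × Bool → Char → Int × Bool := fun st char =>
  let st1 := if char == '(' then (st.1, false) else st
  if PySem.Chars.isdigit char && st1.2 then (st1.1 + 1, st1.2)
  else if PySem.Chars.isdigit char && !st1.2 then (st1.1, true)
  else st1

lemma pvStep_paren (n : Int) (b : Bool) : pvStep (n, b) '(' = (n, false) := by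
  have : PySem.Chars.isdigit '(' = false := by decide
  simp [pvStep, this]

lemma pvStep_digit_true (n : Int) (c : Char) (hp : c ≠ '(') (hd : PySem.Chars.isdigit c = true) :
    pvStep (n, true) c = (n + 1, true) := by
  simp [pvStep, hp, hd]

lemma pvStep_digit_false (n : Int) (c : Char) (hp : c ≠ '(') (hd : PySem.Chars.isdigit c = true) :
    pvStep (n, false) c = (n, true) := by
  simp [pvStep, hp, hd]

lemma pvStep_other (n : Int) (b : Bool) (c : Char) (hp : c ≠ '(') (hd : PySem.Chars.isdigit c = false) :
    pvStep (n, b) c = (n, b) := by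
  simp [pvStep, hp, hd]

lemma pvScan_eq (l : List Char) : ∀ n : Int,
    (l.foldl pvStep (n, true)).1 = n + pvSumRest (pvDcl (pvSegs l).1) (pvSegs l).2
    ∧
    (l.foldl pvStep (n, false)).1 = n + pvSumRest (pvSkip (pvSegs l).1) (pvSegs l).2 := by
  induction l with
  | nil => intro n; simp [pvSegs, pvSumRest, pvDcl, pvSkip]
  | cons c t ih =>
      intro n
      by_cases hp : c = '('
      · subst hp
        rw [List.foldl_cons, List.foldl_cons, pvStep_paren, pvStep_paren]
        have h0 : pvDcl ([] : List Char) = 0 := by simp [pvDcl]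
        have hs : pvSkip ([] : List Char) = 0 := by simp [pvSkip, h0]
        constructor <;>
        · rw [(ih n).2]
          simp [pvSegs]
          rw [pvSumRest_cons]
          simp [h0, hs]
      · by_cases hd : PySem.Chars.isdigit c = true
        · constructor
          · rw [List.foldl_cons, pvStep_digit_true n c hp hd, (ih (n + 1)).1]
            simp only [pvSegs, hp, if_false, pvDcl_cons, hd, if_true]
            rw [pvSumRest_shift]
            ring
          · rw [List.foldl_cons, pvStep_digit_false n c hp hd, (ih n).1]
            have hsk : pvSkip (c :: (pvSegs t).1) = pvDcl (pvSegs t).1 := by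
              have hn := pvDcl_nonneg (pvSegs t).1
              simp only [pvSkip, pvDcl_cons, hd, if_true]
              have hne : (1 : Int) + pvDcl (pvSegs t).1 ≠ 0 := by omega
              rw [if_pos hne]; ring
            simp only [pvSegs, hp, if_false, hsk]
        · simp only [Bool.not_eq_true] at hd
          constructor
          · rw [List.foldl_cons, pvStep_other n true c hp hd, (ih n).1]
            simp only [pvSegs, hp, if_false, pvDcl_cons, hd]
            norm_num
          · rw [List.foldl_cons, pvStep_other n false c hp hd, (ih n).2]
            have hsk : pvSkip (c :: (pvSegs t).1) = pvSkip (pvSegs t).1 := by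
              simp [pvSkip, pvDcl_cons, hd]
            simp only [pvSegs, hp, if_false, hsk]

-- splitOn with the single-character separator '(' computes pvSegs
lemma pvGo_char : ∀ (l : List Char) (fuel : Nat) (cur : List Char) (acc : List (List Char)),
    l.length < fuel →
    PySem.Chars.splitOn.go ['('] fuel l cur acc
      = acc.reverse ++ (cur.reverse ++ (pvSegs l).1) :: (pvSegs l).2 := by
  intro l
  induction l with
  | nil =>
      intro fuel cur acc h
      obtain ⟨f, rfl⟩ : ∃ f, fuel = f + 1 := ⟨fuel - 1, by omega⟩
      simp [PySem.Chars.splitOn.go, pvSegs]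
  | cons c t ih =>
      intro fuel cur acc h
      obtain ⟨f, rfl⟩ : ∃ f, fuel = f + 1 := ⟨fuel - 1, by omega⟩
      have ht : t.length < f := by simpa using h
      by_cases hp : c = '('
      · subst hp
        have hpre : List.isPrefixOf ['('] ('(' :: t) = true := by simp [List.isPrefixOf]
        simp only [PySem.Chars.splitOn.go, hpre, if_pos, List.length_cons, List.drop_succ_cons, List.length_nil, List.drop_zero]
        rw [ih f [] (cur.reverse :: acc) ht]
        simp [pvSegs]
      · have hpre : List.isPrefixOf ['('] (c :: t) = false := by
          simp [List.isPrefixOf, BEq.beq]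
          exact fun h' => hp h'.symm
        simp only [PySem.Chars.splitOn.go, hpre, Bool.false_eq_true, if_false]
        rw [ih f (c :: cur) acc ht]
        simp [pvSegs, hp]

lemma pvSplitOn_char (l : List Char) :
    PySem.Chars.splitOn l ['('] = (pvSegs l).1 :: (pvSegs l).2 := by
  rw [PySem.Chars.splitOn, pvGo_char l (l.length + 1) [] [] (by omega)]
  simp

-- ===== VERDICT (by name: the statement is the Claim_ definition above) =====
theorem get_beats_length_py_spec : Claim_equal_get_beats_length_py := by
  intro pattern _
  unfold Spec_get_beats_length_py get_beats_length_py get_beats_length_py_alt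
  have hsplit : PySem.Str.split? pattern "(" =
      some ((((pvSegs pattern.toList).1 :: (pvSegs pattern.toList).2).map String.ofList)) := by
    rw [PySem.Str.split?]
    simp [PySem.Chars.split?, pvSplitOn_char]
  rw [hsplit]
  simp only [List.map_cons]
  have hdig : ∀ l : List Char, pvDigits (String.ofList l) = pvDcl l := by
    intro l; simp [pvDigits, pvDcl]
  have hrest : ∀ (r : List (List Char)) (init : Int),
      (r.map String.ofList).foldl (fun total seg =>
        let d := pvDigits seg
        if d ≠ 0 then total + (d - 1) else total) init = pvSumRest init r := by
    intro r
    induction r with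
    | nil => intro init; simp [pvSumRest]
    | cons f t ih =>
        intro init
        simp only [List.map_cons, List.foldl_cons, pvSumRest_cons, hdig]
        rw [ih]
        simp only [pvSkip]
        split <;> simp
  rw [hrest, hdig]
  have h := (pvScan_eq pattern.toList 0).1
  rw [zero_add] at h
  exact h
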